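-- pv_equiv track=rewrite | github.com/SethoE/MatchingMarktplatzAufgabe | palindrom_and_anagramm.py | checkforAnagramm
-- ===== SOURCE A (Python) =====
-- duden = ["lampe", "palme", "anna", "otto", "regallager", "lagerregal", "ampel", ""]
--
-- def checkforAnagramm(word):
--     sorted_word = sorted(word)
--     for anagramm_word in duden:
--         if anagramm_word == word:
--             continue
--         if(sorted_word == sorted(anagramm_word)):
--             return True
--     return False
-- ===== SOURCE B (Python) =====
-- duden = ["lampe", "palme", "anna", "otto", "regallager", "lagerregal", "ampel", ""]
--
-- _ANAGRAM_INDEX = {}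
-- for _w in duden:
--     _ANAGRAM_INDEX.setdefault(''.join(sorted(_w)), []).append(_w)
--
-- def checkforAnagramm(word):
--     bucket = _ANAGRAM_INDEX.get(''.join(sorted(word)), [])
--     return any(w != word for w in bucket)
-- ===== Notes on version B (the rewrite author's own statement) =====
-- stated objective: idiomatic
-- what changed: Replaces the per-call loop that re-sorts every duden entry with a module-level dict index from sorted-character key to bucket of duden words; the call does one key lookup and checks the bucket for a word other than the input.
import Mathlib
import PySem

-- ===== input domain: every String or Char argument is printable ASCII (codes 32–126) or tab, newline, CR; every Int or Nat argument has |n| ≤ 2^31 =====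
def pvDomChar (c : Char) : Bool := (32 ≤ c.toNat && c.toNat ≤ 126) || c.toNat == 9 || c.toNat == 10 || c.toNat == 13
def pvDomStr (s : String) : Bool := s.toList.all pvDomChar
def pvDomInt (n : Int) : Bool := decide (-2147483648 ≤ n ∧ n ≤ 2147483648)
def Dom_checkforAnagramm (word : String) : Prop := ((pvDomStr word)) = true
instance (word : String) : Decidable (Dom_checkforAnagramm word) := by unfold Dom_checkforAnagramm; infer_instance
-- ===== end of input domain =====

-- B replaces A's per-call scan that re-sorts every duden entry with a module-level
-- dict index from sorted-character key to the bucket of duden words sharing it (idiomatic).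


-- module-level constant shared by both versions
def duden : List String :=
  ["lampe", "palme", "anna", "otto", "regallager", "lagerregal", "ampel", ""]

-- ===== PORT A =====
-- the for-loop over duden with 'continue' on the exact match
def checkA_loop (word : String) (sortedWord : List Char) : List String → Bool
  | [] => false
  | w :: rest =>
    if w == word then checkA_loop word sortedWord rest
    else if sortedWord == PySem.List.sorted w.toList (fun c => c) false then true
    else checkA_loop word sortedWord rest

def checkforAnagramm (word : String) : Bool :=
  checkA_loop word (PySem.List.sorted word.toList (fun c => c) false) duden

-- ===== PORT B =====
-- module-level index build: for _w in duden: _ANAGRAM_INDEX.setdefault(key, []).append(_w)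
def anagramIndex : PySem.Dict String (List String) :=
  duden.foldl
    (fun d w =>
      let k := String.ofList (PySem.List.sorted w.toList (fun c => c) false)
      d.insert k (d.getD k [] ++ [w]))
    (PySem.Dict.mk [])

def checkforAnagramm_alt (word : String) : Bool :=
  let bucket :=
    anagramIndex.getD (String.ofList (PySem.List.sorted word.toList (fun c => c) false)) []
  bucket.any (fun w => w != word)

-- ===== PRECONDITION & SPEC =====
def Spec_checkforAnagramm (word : String) (out : Bool) : Prop := out = checkforAnagramm_alt word
instance (word : String) (out : Bool) : Decidable (Spec_checkforAnagramm word out) := by unfold Spec_checkforAnagramm; infer_instance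

-- ===== CLAIM (what is proved, stated in full; the proofs are below) =====
def Claim_equal_checkforAnagramm : Prop := ∀ (word : String), Dom_checkforAnagramm word → Spec_checkforAnagramm word (checkforAnagramm word)

-- ===== LEMMAS AND PROOFS =====

-- A's loop returns true iff some entry other than word has the same sorted key
theorem checkA_loop_eq_any (word : String) (s : List Char) (l : List String) :
    checkA_loop word s l
      = l.any (fun w => (w != word) && (s == PySem.List.sorted w.toList (fun c => c) false)) := by
  induction l with
  | nil => rfl
  | cons w rest ih =>
    by_cases h1 : w = word
    · subst h1; simp [checkA_loop, ih]
    · have hb : (w == word) = false := beq_eq_false_iff_ne.mpr h1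
      cases h2 : (s == PySem.List.sorted w.toList (fun c => c) false) with
      | true => simp [checkA_loop, hb, h2, h1]
      | false => simp [checkA_loop, hb, h2, ih]

-- the module-level index, evaluated once
theorem anagramIndex_eval :
    anagramIndex = PySem.Dict.mk
      [("aelmp", ["lampe", "palme", "ampel"]), ("aann", ["anna"]), ("oott", ["otto"]),
       ("aaeeggllrr", ["regallager", "lagerregal"]), ("", [""])] := rfl

theorem ofList_ne_beq {s l : List Char} {t : String} (hl : t.toList = l) (h : ¬ s = l) :
    (t == String.ofList s) = false := by
  refine beq_eq_false_iff_ne.mpr ?_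
  intro e
  exact h (by rw [← hl, e]; simp)

theorem checkforAnagramm_spec' (word : String) :
    checkforAnagramm word = checkforAnagramm_alt word := by
  unfold checkforAnagramm checkforAnagramm_alt
  rw [checkA_loop_eq_any, anagramIndex_eval]
  generalize PySem.List.sorted word.toList (fun c => c) false = s
  simp only [duden, List.any_cons, List.any_nil,
    show PySem.List.sorted "lampe".toList (fun c => c) false = "aelmp".toList from rfl,
    show PySem.List.sorted "palme".toList (fun c => c) false = "aelmp".toList from rfl,
    show PySem.List.sorted "ampel".toList (fun c => c) false = "aelmp".toList from rfl,
    show PySem.List.sorted "anna".toList (fun c => c) false = "aann".toList from rfl,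
    show PySem.List.sorted "otto".toList (fun c => c) false = "oott".toList from rfl,
    show PySem.List.sorted "regallager".toList (fun c => c) false = "aaeeggllrr".toList from rfl,
    show PySem.List.sorted "lagerregal".toList (fun c => c) false = "aaeeggllrr".toList from rfl,
    show PySem.List.sorted "".toList (fun c => c) false = "".toList from rfl]
  by_cases h1 : s = ['a', 'e', 'l', 'm', 'p']
  · subst h1; simp [PySem.Dict.getD, PySem.Dict.get?_mk_cons]
  · by_cases h2 : s = ['a', 'a', 'n', 'n']
    · subst h2; simp [PySem.Dict.getD, PySem.Dict.get?_mk_cons]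
    · by_cases h3 : s = ['o', 'o', 't', 't']
      · subst h3; simp [PySem.Dict.getD, PySem.Dict.get?_mk_cons]
      · by_cases h4 : s = ['a', 'a', 'e', 'e', 'g', 'g', 'l', 'l', 'r', 'r']
        · subst h4; simp [PySem.Dict.getD, PySem.Dict.get?_mk_cons]
        · by_cases h5 : s = []
          · subst h5; simp [PySem.Dict.getD, PySem.Dict.get?_mk_cons,
              ofList_ne_beq (t := "aelmp") rfl h1, ofList_ne_beq (t := "aann") rfl h2,
              ofList_ne_beq (t := "oott") rfl h3, ofList_ne_beq (t := "aaeeggllrr") rfl h4]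
          · have c1 : (s == ['a', 'e', 'l', 'm', 'p']) = false := beq_eq_false_iff_ne.mpr h1
            have c2 : (s == ['a', 'a', 'n', 'n']) = false := beq_eq_false_iff_ne.mpr h2
            have c3 : (s == ['o', 'o', 't', 't']) = false := beq_eq_false_iff_ne.mpr h3
            have c4 : (s == ['a', 'a', 'e', 'e', 'g', 'g', 'l', 'l', 'r', 'r']) = false :=
              beq_eq_false_iff_ne.mpr h4
            have c5 : s.isEmpty = false := by simp [h5]
            simp [PySem.Dict.getD, PySem.Dict.get?, List.find?, c1, c2, c3, c4, c5,
              ofList_ne_beq (t := "aelmp") rfl h1, ofList_ne_beq (t := "aann") rfl h2,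
              ofList_ne_beq (t := "oott") rfl h3, ofList_ne_beq (t := "aaeeggllrr") rfl h4,
              ofList_ne_beq (t := "") rfl h5]

-- ===== VERDICT (by name: the statement is the Claim_ definition above) =====
theorem checkforAnagramm_spec : Claim_equal_checkforAnagramm := by
  intro word _
  exact checkforAnagramm_spec' word
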